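-- pv_equiv track=rewrite | github.com/AndrewstheBuilder/AdventofCode2020 | day6.py | process
-- ===== SOURCE A (Python) =====
-- def process( arr ):
--     a = []
--     count = 0
--     for i in range( 0, len(arr)):
--         if( i == 0 ):
--             for char in arr[i]:
--                 a.append( char )
--                 count += 1
--             continue
--         for char in arr[i]:
--             if( not(char in a) ):
--                 a.append( char )
--                 count += 1
--     return count
-- ===== SOURCE B (Python) =====
-- def process(arr):
--     if not arr:
--         return 0
--     # distinct chars over ALL rows, plus a correction so first-row duplicates count:
--     # A's answer = len(arr[0]) + |set(rest) - set(first)|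
--     #            = (len(arr[0]) - |set(arr[0])|) + |set(everything)|
--     return len(arr[0]) - len(set(arr[0])) + len(set("".join(arr)))
-- ===== Notes on version B (the rewrite author's own statement) =====
-- stated objective: simpler
-- what changed: Replaces A's index loop with per-char membership scans in a growing list by a closed-form identity: the answer equals (len of first row minus its distinct count) plus the distinct character count of the whole input joined, computed with two set constructions and no first/rest split.
import Mathlib
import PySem

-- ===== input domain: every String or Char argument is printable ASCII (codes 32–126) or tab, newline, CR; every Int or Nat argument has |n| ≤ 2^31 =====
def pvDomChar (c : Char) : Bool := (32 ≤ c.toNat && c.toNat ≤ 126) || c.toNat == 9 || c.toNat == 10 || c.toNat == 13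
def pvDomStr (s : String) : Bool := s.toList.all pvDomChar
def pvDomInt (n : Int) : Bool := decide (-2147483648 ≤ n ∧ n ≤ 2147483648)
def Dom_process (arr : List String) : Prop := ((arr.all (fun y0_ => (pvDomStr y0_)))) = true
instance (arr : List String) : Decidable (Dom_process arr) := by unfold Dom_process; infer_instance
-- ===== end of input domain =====

-- B replaces A's accumulation loops with a closed-form identity: first-row length minus its distinct count, plus the distinct count of all rows joined; return values only.

-- ===== PORT A =====
-- for i in range(0, len(arr)): i == 0 → append every char (counting duplicates); else append-if-new
def process (arr : List String) : Int :=
  let st := (List.range arr.length).foldl (fun (st : List Char × Int) i =>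
    if i = 0 then
      (arr.getD i "").toList.foldl (fun st c => (st.1 ++ [c], st.2 + 1)) st
    else
      (arr.getD i "").toList.foldl (fun st c =>
        if st.1.contains c then st else (st.1 ++ [c], st.2 + 1)) st) ([], 0)
  st.2

-- ===== PORT B =====
def process_alt (arr : List String) : Int :=
  match arr with
  | [] => 0
  | h :: t =>
    PySem.Str.len h - PySem.Set.len (PySem.Set.ofList h.toList)
      + PySem.Set.len (PySem.Set.ofList ((h :: t).flatMap (fun line => line.toList)))

-- ===== PRECONDITION & SPEC =====
def Spec_process (arr : List String) (out : Int) : Prop := out = process_alt arr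
instance (arr : List String) (out : Int) : Decidable (Spec_process arr out) := by unfold Spec_process; infer_instance

-- ===== CLAIM =====
def Claim_equal_process : Prop := ∀ (arr : List String), Dom_process arr → Spec_process arr (process arr)

-- ===== LEMMAS AND PROOFS =====

-- the list of chars of l that are new relative to seen chars a, first occurrences in order
def pvNew (l : List Char) (a : List Char) : List Char :=
  match l with
  | [] => []
  | c :: l => if a.contains c then pvNew l a else c :: pvNew l (a ++ [c])

-- first-row loop: appends every char, count rises with each
theorem pv_first_row (l : List Char) : ∀ (a : List Char) (c : Int),
    l.foldl (fun st ch => (st.1 ++ [ch], st.2 + 1)) (a, c) = (a ++ l, c + l.length) := by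
  induction l with
  | nil => intro a c; simp
  | cons x l ih => intro a c; simp [List.foldl, ih]; omega

-- rest-phase char loop in terms of pvNew
theorem pv_rest_chars (l : List Char) : ∀ (a : List Char) (c : Int),
    l.foldl (fun st ch => if st.1.contains ch then st else (st.1 ++ [ch], st.2 + 1)) (a, c)
      = (a ++ pvNew l a, c + (pvNew l a).length) := by
  induction l with
  | nil => intro a c; simp [pvNew]
  | cons x l ih =>
    intro a c
    simp only [List.foldl_cons, pvNew]
    by_cases hx : a.contains x = true
    · simp only [hx, if_true]
      exact ih a c
    · simp only [Bool.not_eq_true] at hx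
      simp only [hx, Bool.false_eq_true, if_false]
      rw [ih (a ++ [x]) (c + 1)]
      simp
      omega

-- rest-phase row loop in terms of pvNew of the flattened rows
theorem pv_new_append (l₁ : List Char) : ∀ (l₂ a : List Char),
    pvNew (l₁ ++ l₂) a = pvNew l₁ a ++ pvNew l₂ (a ++ pvNew l₁ a) := by
  induction l₁ with
  | nil => intro l₂ a; simp [pvNew]
  | cons x l ih =>
    intro l₂ a
    simp only [List.cons_append, pvNew]
    by_cases hx : a.contains x = true
    · simp only [hx, if_true]
      exact ih l₂ a
    · simp only [Bool.not_eq_true] at hx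
      simp only [hx, Bool.false_eq_true, if_false, ih l₂ (a ++ [x])]
      simp

theorem pv_rest_rows (t : List String) : ∀ (a : List Char) (c : Int),
    t.foldl (fun st line => line.toList.foldl
        (fun st ch => if st.1.contains ch then st else (st.1 ++ [ch], st.2 + 1)) st) (a, c)
      = (a ++ pvNew (t.flatMap (fun line => line.toList)) a,
         c + (pvNew (t.flatMap (fun line => line.toList)) a).length) := by
  induction t with
  | nil => intro a c; simp [pvNew]
  | cons s t ih =>
    intro a c
    simp only [List.foldl, List.flatMap_cons]
    rw [pv_rest_chars, ih, pv_new_append]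
    simp
    omega

-- folding over range of indices = structural fold
theorem pv_foldl_range_getD {α β : Type} (g : β → α → β) (d : α) :
    ∀ (l : List α) (s : β),
      (List.range l.length).foldl (fun st i => g st (l.getD i d)) s = l.foldl g s := by
  intro l
  induction l with
  | nil => intro s; simp
  | cons x l ih =>
    intro s
    rw [List.length_cons, List.range_succ_eq_map, List.foldl_cons, List.foldl_map]
    simpa using ih (g s x)

theorem pv_rest_range (t : List String) (s : List Char × Int) :
    (List.range t.length).foldl (fun st i => (t.getD i "").toList.foldl
      (fun st c => if st.1.contains c then st else (st.1 ++ [c], st.2 + 1)) st) s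
    = t.foldl (fun st line => line.toList.foldl
      (fun st c => if st.1.contains c then st else (st.1 ++ [c], st.2 + 1)) st) s :=
  pv_foldl_range_getD
    (fun (st : List Char × Int) (line : String) => line.toList.foldl
      (fun st c => if st.1.contains c then st else (st.1 ++ [c], st.2 + 1)) st) "" t s

-- folding Set.add = append the new chars
theorem pv_foldl_add (l : List Char) : ∀ (s : List Char),
    List.foldl PySem.Set.add s l = s ++ pvNew l s := by
  induction l with
  | nil => intro s; simp [pvNew]
  | cons x l ih =>
    intro s
    simp only [List.foldl_cons, PySem.Set.add, PySem.Set.contains, pvNew]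
    by_cases hx : s.contains x = true
    · simp only [hx, if_true]
      exact ih s
    · simp only [Bool.not_eq_true] at hx
      simp only [hx, Bool.false_eq_true, if_false]
      rw [ih (s ++ [x])]
      simp

-- pvNew depends only on the membership of its accumulator
theorem pv_new_congr (l : List Char) : ∀ (a b : List Char),
    (∀ x : Char, x ∈ a ↔ x ∈ b) → pvNew l a = pvNew l b := by
  induction l with
  | nil => intro a b _; simp [pvNew]
  | cons x l ih =>
    intro a b H
    simp only [pvNew, List.contains_eq_mem]
    by_cases hx : x ∈ a
    · simp only [hx, (H x).1 hx, decide_true, if_true]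
      exact ih a b H
    · have hb : x ∉ b := fun h => hx ((H x).2 h)
      simp only [hx, hb, decide_false, Bool.false_eq_true, if_false]
      congr 1
      exact ih (a ++ [x]) (b ++ [x]) (by intro y; simp [H y])

-- ===== VERDICT =====
theorem process_spec : Claim_equal_process := by
  intro arr _
  unfold Spec_process process process_alt
  match arr with
  | [] => simp
  | h :: t =>
    simp only [List.length_cons, List.range_succ_eq_map, List.foldl_cons, List.foldl_map]
    simp only [if_true, Nat.succ_eq_add_one, List.getD_cons_zero]
    rw [pv_first_row]
    have hbody : ∀ (st : List Char × Int) (i : ℕ),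
        (if i + 1 = 0 then
          ((h :: t).getD (i+1) "").toList.foldl (fun st c => (st.1 ++ [c], st.2 + 1)) st
        else
          ((h :: t).getD (i+1) "").toList.foldl
            (fun st c => if st.1.contains c then st else (st.1 ++ [c], st.2 + 1)) st)
        = (t.getD i "").toList.foldl
            (fun st c => if st.1.contains c then st else (st.1 ++ [c], st.2 + 1)) st := by
      intro st i; simp
    simp only [hbody]
    rw [pv_rest_range, pv_rest_rows]
    -- set of all chars = set of first row ++ the new chars of the rest
    have hall : PySem.Set.ofList ((h :: t).flatMap (fun line => line.toList))
        = PySem.Set.ofList h.toList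
          ++ pvNew (t.flatMap (fun line => line.toList)) (PySem.Set.ofList h.toList) := by
      rw [PySem.Set.ofList_eq_foldl]
      simp only [List.flatMap_cons, List.foldl_append]
      rw [← PySem.Set.ofList_eq_foldl, pv_foldl_add]
    have hcongr : pvNew (t.flatMap (fun line => line.toList)) (PySem.Set.ofList h.toList)
        = pvNew (t.flatMap (fun line => line.toList)) h.toList :=
      pv_new_congr _ _ _ (by intro x; simp [PySem.Set.mem_ofList])
    simp only [PySem.Set.len, PySem.Str.len, hall, hcongr, List.length_append]
    simp
    ring
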